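-- pv_equiv track=rewrite | github.com/GrahamStrickland/epi | test/arrays/test_dutch_national_flag_four_values.py | is_partitioned
-- ===== SOURCE A (Python) =====
-- def is_partitioned(A: list[int]) -> bool:
--     j = 0
--     for _ in range(4):
--         if j >= len(A):
--             break
--         val = A[j]
--         while j < len(A) and A[j] == val:
--             j += 1
--
--     return j == len(A)
-- ===== SOURCE B (Python) =====
-- def is_partitioned(A: list[int]) -> bool:
--     if not A:
--         return True
--     runs = 1
--     for prev, cur in zip(A, A[1:]):
--         if cur != prev:
--             runs += 1
--     return runs <= 4
-- ===== Notes on version B (the rewrite author's own statement) =====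
-- stated objective: simpler
-- what changed: Replaces A's cursor that advances through up to four runs via a nested for/while loop with a single flat pass over zip(A, A[1:]) that counts adjacent transitions and checks 1 + transitions <= 4.
import Mathlib
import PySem

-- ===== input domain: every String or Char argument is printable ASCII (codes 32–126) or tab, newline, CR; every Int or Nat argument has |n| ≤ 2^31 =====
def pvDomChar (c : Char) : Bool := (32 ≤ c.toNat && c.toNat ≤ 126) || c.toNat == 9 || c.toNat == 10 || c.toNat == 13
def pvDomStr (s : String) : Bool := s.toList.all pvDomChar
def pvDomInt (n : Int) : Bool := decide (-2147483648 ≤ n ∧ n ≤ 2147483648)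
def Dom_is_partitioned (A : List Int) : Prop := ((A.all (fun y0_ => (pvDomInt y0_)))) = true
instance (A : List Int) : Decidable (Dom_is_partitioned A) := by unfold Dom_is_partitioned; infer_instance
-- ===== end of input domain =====

-- B replaces A's nested cursor loops (advance through up to four runs) by one flat
-- pass counting adjacent transitions; objective: simpler.

-- ===== PORT A =====
-- the inner 'while j < len(A) and A[j] == val: j += 1'
def pvWhileRun (A : List Int) (val : Int) (j : Nat) : Nat :=
  if _h : j < A.length ∧ A.getD j 0 = val then pvWhileRun A val (j + 1) else j
termination_by A.length - j
decreasing_by omega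

-- the outer 'for _ in range(4)' with the break
def pvOuter : Nat → List Int → Nat → Nat
  | 0, _, j => j
  | n + 1, A, j =>
    if j ≥ A.length then j
    else pvOuter n A (pvWhileRun A (A.getD j 0) j)

def is_partitioned (A : List Int) : Bool :=
  decide (pvOuter 4 A 0 = A.length)

-- ===== PORT B =====
def is_partitioned_alt (A : List Int) : Bool :=
  match A with
  | [] => true
  | _ :: _ =>
    let runs := (A.zip A.tail).foldl (fun r p => if p.2 ≠ p.1 then r + 1 else r) 1
    decide (runs ≤ 4)

-- ===== PRECONDITION & SPEC =====
def Spec_is_partitioned (A : List Int) (out : Bool) : Prop := out = is_partitioned_alt A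
instance (A : List Int) (out : Bool) : Decidable (Spec_is_partitioned A out) := by unfold Spec_is_partitioned; infer_instance

-- ===== CLAIM (what is proved, stated in full; the proofs are below) =====
def Claim_equal_is_partitioned : Prop := ∀ (A : List Int), Dom_is_partitioned A → Spec_is_partitioned A (is_partitioned A)

-- ===== LEMMAS AND PROOFS =====

-- the common specification: number of maximal runs of equal adjacent values
def pvRunCount : List Int → Nat
  | [] => 0
  | x :: xs => 1 + pvRunCount (xs.dropWhile (fun y => y == x))
termination_by l => l.length
decreasing_by
  have := List.length_dropWhile_le (fun y => y == x) xs
  simp; omega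

theorem pvRunCount_eq_zero_iff (l : List Int) : pvRunCount l = 0 ↔ l = [] := by
  cases l <;> simp [pvRunCount]

theorem pvTakeWhile_len_le (p : Int → Bool) (l : List Int) :
    (l.takeWhile p).length ≤ l.length := by
  induction l with
  | nil => simp
  | cons x xs ih =>
    rw [List.takeWhile_cons]
    split
    · simpa using ih
    · simp

theorem pvDropWhile_eq_drop (p : Int → Bool) (l : List Int) :
    l.dropWhile p = l.drop (l.takeWhile p).length := by
  nth_rewrite 3 [← List.takeWhile_append_dropWhile (p := p) (l := l)]
  rw [List.drop_left' rfl]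

theorem pvWhileRun_eq (A : List Int) (val : Int) (j : Nat) :
    pvWhileRun A val j = j + ((A.drop j).takeWhile (fun y => y == val)).length := by
  unfold pvWhileRun
  split
  · rename_i h
    obtain ⟨hj, hv⟩ := h
    rw [pvWhileRun_eq A val (j + 1), List.drop_eq_getElem_cons hj, List.takeWhile_cons]
    have hv' : (A[j] == val) = true := by
      simp [List.getD_eq_getElem?_getD, List.getElem?_eq_getElem hj] at hv
      simp [hv]
    rw [hv']
    simp
    omega
  · rename_i h
    rcases Nat.lt_or_ge j A.length with hj | hj
    · have hv : ¬ A.getD j 0 = val := fun hv => h ⟨hj, hv⟩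
      rw [List.drop_eq_getElem_cons hj, List.takeWhile_cons]
      have hv' : (A[j] == val) = false := by
        simp [List.getD_eq_getElem?_getD, List.getElem?_eq_getElem hj] at hv
        simp [hv]
      rw [hv']
      simp
    · rw [List.drop_eq_nil_of_le hj]
      simp
termination_by A.length - j
decreasing_by omega

theorem pvOuter_eq_iff (n : Nat) (A : List Int) (j : Nat) (hj : j ≤ A.length) :
    pvOuter n A j = A.length ↔ pvRunCount (A.drop j) ≤ n := by
  induction n generalizing j with
  | zero =>
    simp only [pvOuter, Nat.le_zero, pvRunCount_eq_zero_iff]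
    constructor
    · intro h; subst h; simp
    · intro h
      have : A.length - j = 0 := by
        have := List.length_drop (l := A) (i := j); rw [h] at this; simpa using this.symm
      omega
  | succ n ih =>
    by_cases hge : j ≥ A.length
    · have : j = A.length := le_antisymm hj hge
      subst this
      simp [pvOuter, pvRunCount]
    · rw [Nat.not_le] at hge
      have hdrop := List.drop_eq_getElem_cons hge
      have hval : A.getD j 0 = A[j] := by
        simp [List.getD_eq_getElem?_getD, List.getElem?_eq_getElem hge]
      simp only [pvOuter, if_neg (by omega : ¬ j ≥ A.length)]
      rw [pvWhileRun_eq, hval, hdrop]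
      set x := A[j] with hx
      set xs := A.drop (j + 1) with hxs
      have hlen : xs.length = A.length - (j + 1) := by simp [hxs]
      have htw : (List.takeWhile (fun y => y == x) (x :: xs)).length
          = 1 + (xs.takeWhile (fun y => y == x)).length := by
        simp; omega
      rw [htw]
      have htwle := pvTakeWhile_len_le (fun y => y == x) xs
      have hj' : j + (1 + (xs.takeWhile (fun y => y == x)).length) ≤ A.length := by omega
      rw [ih _ hj']
      have hdrop2 : A.drop (j + (1 + (xs.takeWhile (fun y => y == x)).length))
          = xs.dropWhile (fun y => y == x) := by
        have : j + (1 + (xs.takeWhile (fun y => y == x)).length)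
            = (j + 1) + (xs.takeWhile (fun y => y == x)).length := by omega
        rw [this, ← List.drop_drop, ← hxs, ← pvDropWhile_eq_drop]
      rw [hdrop2]
      have : pvRunCount (x :: xs) = 1 + pvRunCount (xs.dropWhile (fun y => y == x)) := by
        rw [pvRunCount]
      omega

-- counts adjacent unequal pairs, structurally
def pvAdjDiff (x : Int) : List Int → Nat
  | [] => 0
  | y :: ys => (if y = x then 0 else 1) + pvAdjDiff y ys

theorem pvFoldl_zip (x : Int) (xs : List Int) (acc : Nat) :
    ((x :: xs).zip xs).foldl (fun r p => if p.2 ≠ p.1 then r + 1 else r) acc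
      = acc + pvAdjDiff x xs := by
  induction xs generalizing x acc with
  | nil => simp [pvAdjDiff]
  | cons y ys ih =>
    simp only [List.zip_cons_cons, List.foldl_cons]
    rw [ih y]
    simp [pvAdjDiff]
    by_cases h : y = x <;> simp [h] <;> omega

theorem pvAdjDiff_eq (x : Int) (xs : List Int) :
    1 + pvAdjDiff x xs = pvRunCount (x :: xs) := by
  induction xs generalizing x with
  | nil => simp [pvAdjDiff, pvRunCount]
  | cons y ys ih =>
    by_cases h : y = x
    · subst h
      have h1 : pvRunCount (y :: y :: ys) = 1 + pvRunCount (ys.dropWhile (fun z => z == y)) := by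
        rw [pvRunCount]; simp
      have h2 : pvRunCount (y :: ys) = 1 + pvRunCount (ys.dropWhile (fun z => z == y)) := by
        rw [pvRunCount]
      simp [pvAdjDiff, h1, ← h2, ih]
    · have h1 : pvRunCount (x :: y :: ys) = 1 + pvRunCount (y :: ys) := by
        rw [pvRunCount]
        simp [h]
      simp [pvAdjDiff, h, h1, ← ih]

-- ===== VERDICT (by name: the statement is the Claim_ definition above) =====
theorem is_partitioned_spec : Claim_equal_is_partitioned := by
  intro A _
  unfold Spec_is_partitioned is_partitioned is_partitioned_alt
  cases A with
  | nil => decide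
  | cons x xs =>
    simp only [List.tail_cons]
    simp only [pvFoldl_zip]
    have h := pvOuter_eq_iff 4 (x :: xs) 0 (by omega)
    simp only [List.drop_zero] at h
    rw [← pvAdjDiff_eq] at h
    simp only [decide_eq_decide]
    omega
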